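-- pv_equiv track=rewrite | github.com/JTibs18/LeetCode | BasicCalculator.py | consolidateNums
-- ===== SOURCE A (Python) =====
-- def consolidateNums(stack):
--     curNum = ''
--     newStack = []
--
--     for i in stack:
--         if i == "+" or i == "-":
--             if curNum == '':
--                 curNum = "0"
--
--             newStack.append(curNum)
--             newStack.append(i)
--             curNum = ''
--         else:
--             curNum += str(i)
--
--     if curNum == '':
--         curNum = "0"
--
--     newStack.append(curNum)
--     return newStack
-- ===== SOURCE B (Python) =====
-- def consolidateNums(stack):
--     # Pass 1: partition tokens into number-groups separated by the operators.
--     groups = [[]]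
--     ops = []
--     for tok in stack:
--         if tok == "+" or tok == "-":
--             groups.append([])
--             ops.append(tok)
--         else:
--             groups[-1].append(str(tok))
--     # Pass 2: assemble — each finished group, joined ('' -> "0"), then its operator.
--     out = []
--     for g, op in zip(groups, ops):
--         num = ''.join(g)
--         out.append(num if num else "0")
--         out.append(op)
--     last = ''.join(groups[-1])
--     out.append(last if last else "0")
--     return out
-- ===== Notes on version B (the rewrite author's own statement) =====
-- stated objective: alternative
-- what changed: B first partitions the tokens into a list of number-groups plus a parallel operator list, then assembles the output in a separate zip pass, instead of A's single loop that accumulates a running string and emits into the result as it goes.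
import Mathlib
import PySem

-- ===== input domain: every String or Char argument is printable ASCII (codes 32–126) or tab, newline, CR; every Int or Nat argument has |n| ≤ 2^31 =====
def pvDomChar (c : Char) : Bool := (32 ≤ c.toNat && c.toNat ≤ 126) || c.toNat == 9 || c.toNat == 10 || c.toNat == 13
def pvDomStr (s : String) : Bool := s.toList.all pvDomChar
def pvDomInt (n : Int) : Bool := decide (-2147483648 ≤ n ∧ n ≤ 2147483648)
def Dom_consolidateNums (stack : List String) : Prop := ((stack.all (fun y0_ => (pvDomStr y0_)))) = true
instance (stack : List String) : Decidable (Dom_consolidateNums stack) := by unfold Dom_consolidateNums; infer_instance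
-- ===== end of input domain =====

-- B groups the tokens first and assembles afterwards; A emits while scanning. Same result, alternative decomposition.

-- ===== PORT A =====
-- loop body of A: state is (curNum, newStack)
def pvStepA (s : String × List String) (i : String) : String × List String :=
  if i == "+" || i == "-" then
    let cur := if s.1 == "" then "0" else s.1
    ("", s.2 ++ [cur, i])
  else (s.1 ++ i, s.2)

def consolidateNums (stack : List String) : List String :=
  let st := stack.foldl pvStepA ("", [])
  let cur := if st.1 == "" then "0" else st.1
  st.2 ++ [cur]

-- ===== PORT B =====
-- pass-1 body of B: state is (groups, ops); `groups[-1].append(tok)` is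
-- "replace the last group by itself with tok appended" (groups is always nonempty)
def pvStepB (s : List (List String) × List String) (tok : String) : List (List String) × List String :=
  if tok == "+" || tok == "-" then (s.1 ++ [[]], s.2 ++ [tok])
  else (s.1.dropLast ++ [s.1.getLastD [] ++ [tok]], s.2)

def consolidateNums_alt (stack : List String) : List String :=
  let st := stack.foldl pvStepB ([[]], [])
  let groups := st.1
  let ops := st.2
  let front := (groups.zip ops).foldl
    (fun out go =>
      let num := String.join go.1
      out ++ [if num == "" then "0" else num, go.2]) []
  let last := String.join (groups.getLastD [])
  front ++ [if last == "" then "0" else last]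

-- ===== PRECONDITION & SPEC =====
def Spec_consolidateNums (stack : List String) (out : List String) : Prop := out = consolidateNums_alt stack
instance (stack : List String) (out : List String) : Decidable (Spec_consolidateNums stack out) := by unfold Spec_consolidateNums; infer_instance

-- ===== CLAIM (what is proved, stated in full; the proofs are below) =====
def Claim_equal_consolidateNums : Prop := ∀ (stack : List String), Dom_consolidateNums stack → Spec_consolidateNums stack (consolidateNums stack)

-- ===== LEMMAS AND PROOFS =====

-- the assembled front part: one "number, operator" pair per finished group
def pvAsm : List (List String) → List String → List String
  | g :: gs, o :: os =>
      (if String.join g == "" then "0" else String.join g) :: o :: pvAsm gs os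
  | _, _ => []

theorem pvJoin_concat (g : List String) (s : String) :
    String.join (g ++ [s]) = String.join g ++ s := by
  simp [String.join]

theorem pvAsm_concat : ∀ (gs : List (List String)) (os : List String),
    gs.length = os.length → ∀ (g : List String) (o : String),
    pvAsm (gs ++ [g]) (os ++ [o]) =
      pvAsm gs os ++ [(if String.join g == "" then "0" else String.join g), o] := by
  intro gs
  induction gs with
  | nil => intro os h g o; cases os with
    | nil => simp [pvAsm]
    | cons _ _ => simp at h
  | cons a gs ih =>
    intro os h g o
    cases os with
    | nil => simp at h
    | cons b os =>
      simp only [List.length_cons, Nat.succ_inj] at h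
      simp [pvAsm, ih os h g o]

theorem pvZip_concat {α β : Type} : ∀ (gs : List α) (os : List β) (g : α),
    gs.length = os.length → (gs ++ [g]).zip os = gs.zip os := by
  intro gs
  induction gs with
  | nil => intro os g h; cases os with
    | nil => simp
    | cons _ _ => simp at h
  | cons a gs ih =>
    intro os g h
    cases os with
    | nil => simp at h
    | cons b os =>
      simp only [List.length_cons, Nat.succ_inj] at h
      simp [ih os g h]

theorem pvZipFold : ∀ (gs : List (List String)) (os : List String) (acc : List String),
    (gs.zip os).foldl
      (fun out go =>
        let num := String.join go.1
        out ++ [if num == "" then "0" else num, go.2]) acc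
    = acc ++ pvAsm gs os := by
  intro gs
  induction gs with
  | nil => intro os acc; simp [pvAsm]
  | cons g gs ih =>
    intro os acc
    cases os with
    | nil => simp [pvAsm]
    | cons o os =>
      simp only [List.zip_cons_cons, List.foldl_cons]
      rw [ih os]
      simp [pvAsm]

-- loop invariant tying A's (curNum, newStack) to B's (groups, ops)
theorem pvLoopInv : ∀ (stack : List String) (gs : List (List String)) (g : List String)
    (ops : List String), gs.length = ops.length →
    ∃ gs' g' ops', gs'.length = ops'.length ∧
      stack.foldl pvStepB (gs ++ [g], ops) = (gs' ++ [g'], ops') ∧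
      stack.foldl pvStepA (String.join g, pvAsm gs ops) = (String.join g', pvAsm gs' ops') := by
  intro stack
  induction stack with
  | nil => intro gs g ops h; exact ⟨gs, g, ops, h, rfl, rfl⟩
  | cons x stack ih =>
    intro gs g ops h
    by_cases hx : (x == "+" || x == "-") = true
    · have hA : pvStepA (String.join g, pvAsm gs ops) x
          = ("", pvAsm gs ops ++ [(if String.join g == "" then "0" else String.join g), x]) := by
        simp [pvStepA, hx]
      have hB : pvStepB (gs ++ [g], ops) x = ((gs ++ [g]) ++ [[]], ops ++ [x]) := by
        simp [pvStepB, hx]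
      obtain ⟨gs', g', ops', h', hB', hA'⟩ :=
        ih (gs ++ [g]) [] (ops ++ [x]) (by simp [h])
      refine ⟨gs', g', ops', h', ?_, ?_⟩
      · simpa [hB] using hB'
      · have : String.join ([] : List String) = "" := rfl
        rw [List.foldl_cons, hA, ← pvAsm_concat gs ops h g x, ← this]
        exact hA'
    · have hA : pvStepA (String.join g, pvAsm gs ops) x
          = (String.join g ++ x, pvAsm gs ops) := by
        simp [pvStepA, hx]
      have hB : pvStepB (gs ++ [g], ops) x = (gs ++ [g ++ [x]], ops) := by
        simp [pvStepB, hx]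
      obtain ⟨gs', g', ops', h', hB', hA'⟩ := ih gs (g ++ [x]) ops h
      refine ⟨gs', g', ops', h', ?_, ?_⟩
      · simpa [hB] using hB'
      · rw [List.foldl_cons, hA, ← pvJoin_concat]
        exact hA'

-- ===== VERDICT (by name: the statement is the Claim_ definition above) =====
theorem consolidateNums_spec : Claim_equal_consolidateNums := by
  intro stack _
  unfold Spec_consolidateNums consolidateNums consolidateNums_alt
  obtain ⟨gs', g', ops', h', hB', hA'⟩ := pvLoopInv stack [] [] [] rfl
  have h0 : String.join ([] : List String) = "" := rfl
  have hA0 : stack.foldl pvStepA ("", []) = (String.join g', pvAsm gs' ops') := by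
    have := hA'
    rw [h0] at this
    simpa [pvAsm] using this
  have hB0 : stack.foldl pvStepB ([[]], []) = (gs' ++ [g'], ops') := by simpa using hB'
  rw [hA0, hB0]
  simp only [pvZip_concat gs' ops' g' h', pvZipFold, List.getLastD_concat]
  simp
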